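-- pv_equiv track=rewrite | github.com/pksolar/sailus | bleeding/method1/lad.py | least_absolute_deviations
-- ===== SOURCE A (Python) =====
-- def least_absolute_deviations(nums, target):
--     left, right = min(nums), max(nums) # 确定左右边界
--     while left <= right:
--         mid = (left + right) // 2
--         error = sum(abs(num - mid) for num in nums) # 计算误差
--         if error == target:
--             return mid
--         elif error < target:
--             right = mid - 1
--         else:
--             left = mid + 1
--     return left # 返回最接近的mid值
-- ===== SOURCE B (Python) =====
-- def _bisect_right(s, x):
--     lo, hi = 0, len(s)
--     while lo < hi:
--         mid = (lo + hi) // 2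
--         if s[mid] <= x:
--             lo = mid + 1
--         else:
--             hi = mid
--     return lo
--
--
-- def least_absolute_deviations(nums, target):
--     s = sorted(nums)
--     n = len(s)
--     pre = [0]
--     acc = 0
--     for x in s:
--         acc += x
--         pre.append(acc)
--     total = pre[n]
--     left, right = s[0], s[n - 1]
--     while left <= right:
--         mid = (left + right) // 2
--         k = _bisect_right(s, mid)
--         e = mid * k - pre[k] + (total - pre[k]) - mid * (n - k)
--         if e == target:
--             return mid
--         if e < target:
--             right = mid - 1
--         else:
--             left = mid + 1
--     return left
-- ===== Notes on version B (the rewrite author's own statement) =====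
-- stated objective: faster
-- what changed: B sorts once and builds prefix sums so each binary-search step computes the absolute-deviation sum by a bisect in O(log n) instead of a full O(n) pass over the list.
import Mathlib
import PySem

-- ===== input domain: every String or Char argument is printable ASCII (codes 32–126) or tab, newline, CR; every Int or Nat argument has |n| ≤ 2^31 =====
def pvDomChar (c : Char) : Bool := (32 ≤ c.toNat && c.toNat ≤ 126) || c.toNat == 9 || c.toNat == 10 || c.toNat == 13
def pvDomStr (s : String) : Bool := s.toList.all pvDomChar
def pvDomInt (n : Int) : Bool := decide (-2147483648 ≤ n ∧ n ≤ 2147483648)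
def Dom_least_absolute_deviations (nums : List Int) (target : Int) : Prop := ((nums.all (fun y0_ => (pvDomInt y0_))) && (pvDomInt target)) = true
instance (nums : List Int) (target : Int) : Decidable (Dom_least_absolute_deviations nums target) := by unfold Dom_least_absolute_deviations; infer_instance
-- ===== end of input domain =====

-- B replaces A's O(n) error recomputation in every binary-search step by a one-time sort
-- plus prefix sums, each error then computed via bisect in O(log n) (measured faster).
-- A raises on the empty list (min of []), and B raises there too (s[0]): Pre_ excludes nums = [].


-- ===== PORT A =====
-- A's while-loop: left/right bounds, mid = (left+right)//2, error = sum of |num - mid| over nums.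
def ladLoopA (nums : List Int) (target left right : Int) : Int :=
  if _h : left ≤ right then
    let mid := PySem.Int.floordiv (left + right) 2
    let error := (nums.map (fun num => |num - mid|)).sum
    if error = target then mid
    else if error < target then ladLoopA nums target left (mid - 1)
    else ladLoopA nums target (mid + 1) right
  else left
termination_by (right + 1 - left).toNat
decreasing_by
  all_goals
    have := PySem.Int.floordiv_two_mid_bounds (lo := left) (hi := right) _h
    omega

def least_absolute_deviations (nums : List Int) (target : Int) : Int :=
  match PySem.List.min? nums (fun x => x), PySem.List.max? nums (fun x => x) with
  | some left, some right => ladLoopA nums target left right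
  | _, _ => 0  -- unreachable: Python's min([]) raises ValueError; excluded by Pre_

-- ===== PORT B =====
-- Source B's prefix-sum building loop:  pre = [0]; acc = 0; for x in s: acc += x; pre.append(acc)
def buildPre (s : List Int) : List Int :=
  (s.foldl (fun (st : List Int × Int) x => (st.1 ++ [st.2 + x], st.2 + x)) ([0], 0)).1

-- Source B's while-loop; the hand-written _bisect_right of Source B is the lo/hi-halving loop of
-- Python's bisect_right and is ported as PySem.List.bisectRight (the identical loop).
def ladLoopB (s pre : List Int) (total : Int) (n : Nat) (target left right : Int) : Int :=
  if _h : left ≤ right then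
    let mid := PySem.Int.floordiv (left + right) 2
    let k := PySem.List.bisectRight s mid
    let e := mid * (k : Int) - pre.getD k 0 + (total - pre.getD k 0) - mid * ((n : Int) - (k : Int))
    if e = target then mid
    else if e < target then ladLoopB s pre total n target left (mid - 1)
    else ladLoopB s pre total n target (mid + 1) right
  else left
termination_by (right + 1 - left).toNat
decreasing_by
  all_goals
    have := PySem.Int.floordiv_two_mid_bounds (lo := left) (hi := right) _h
    omega

def least_absolute_deviations_alt (nums : List Int) (target : Int) : Int :=
  let s := PySem.List.sorted nums (fun x => x)
  let n := s.length
  let pre := buildPre s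
  let total := pre.getD n 0
  ladLoopB s pre total n target (s.getD 0 0) (s.getD (n - 1) 0)

-- ===== PRECONDITION & SPEC =====
-- Pre_ excludes only the empty list, on which A raises ValueError (min([])).
def Pre_least_absolute_deviations (nums : List Int) (target : Int) : Prop := nums ≠ []
instance (nums : List Int) (target : Int) : Decidable (Pre_least_absolute_deviations nums target) := by unfold Pre_least_absolute_deviations; infer_instance
def pvWitness_least_absolute_deviations : List Int × Int := ([1, -3, 2], 4)

def Spec_least_absolute_deviations (nums : List Int) (target : Int) (out : Int) : Prop := out = least_absolute_deviations_alt nums target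
instance (nums : List Int) (target : Int) (out : Int) : Decidable (Spec_least_absolute_deviations nums target out) := by unfold Spec_least_absolute_deviations; infer_instance

-- ===== CLAIM (what is proved, stated in full; the proofs are below) =====
def Claim_equal_least_absolute_deviations : Prop := ∀ (nums : List Int) (target : Int), Dom_least_absolute_deviations nums target → Pre_least_absolute_deviations nums target → Spec_least_absolute_deviations nums target (least_absolute_deviations nums target)

-- ===== LEMMAS AND PROOFS =====

-- buildPre computes 0 :: running partial sums
def partials : List Int → Int → List Int
  | [], _ => []
  | x :: t, a => (a + x) :: partials t (a + x)

theorem buildPre_foldl (s : List Int) (p : List Int) (a : Int) :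
    (s.foldl (fun (st : List Int × Int) x => (st.1 ++ [st.2 + x], st.2 + x)) (p, a)).1
      = p ++ partials s a := by
  induction s generalizing p a with
  | nil => simp [partials]
  | cons x t ih =>
      simp only [List.foldl_cons, partials]
      rw [ih]
      simp

theorem buildPre_eq (s : List Int) : buildPre s = 0 :: partials s 0 := by
  unfold buildPre
  rw [buildPre_foldl]
  simp

theorem partials_getD (s : List Int) (a : Int) (k : Nat) (hk : k ≤ s.length) :
    (a :: partials s a).getD k 0 = a + (s.take k).sum := by
  induction s generalizing a k with
  | nil =>
      cases k with
      | zero => simp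
      | succ j => simp at hk
  | cons x t ih =>
      cases k with
      | zero => simp
      | succ j =>
          simp only [partials, List.getD_cons_succ, List.take_succ_cons, List.sum_cons]
          rw [ih (a + x) j (by simpa using hk)]
          ring

theorem pre_getD (s : List Int) (k : Nat) (hk : k ≤ s.length) :
    (buildPre s).getD k 0 = (s.take k).sum := by
  rw [buildPre_eq]
  simpa using partials_getD s 0 k hk

-- split of the absolute-deviation sum by the predicate x ≤ m
theorem sum_abs_split (t : List Int) (m : Int) :
    (t.map (fun x => |x - m|)).sum =
      m * ((t.filter (fun x => decide (x ≤ m))).length : Int)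
        - (t.filter (fun x => decide (x ≤ m))).sum
        + (t.sum - (t.filter (fun x => decide (x ≤ m))).sum)
        - m * ((t.length : Int) - ((t.filter (fun x => decide (x ≤ m))).length : Int)) := by
  induction t with
  | nil => simp
  | cons x t ih =>
      by_cases hx : x ≤ m
      · have habs : |x - m| = m - x := by
          rw [abs_of_nonpos (by omega)]; ring
        simp only [List.map_cons, List.sum_cons, List.filter_cons, hx, decide_true,
          List.length_cons, List.sum_cons, habs, ih]
        push_cast [List.length_cons, List.sum_cons]
        ring
      · have habs : |x - m| = x - m := by
          rw [abs_of_nonneg (by omega)]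
        simp only [List.map_cons, List.sum_cons, List.filter_cons, hx, decide_false,
          List.length_cons, habs, ih]
        push_cast [List.length_cons, List.sum_cons]
        ring

-- positional characterisation ⇒ filter = take
theorem filter_eq_take (s : List Int) (m : Int) (k : Nat) (hk : k ≤ s.length)
    (h1 : ∀ j, (hj : j < s.length) → j < k → s[j] ≤ m)
    (h2 : ∀ j, (hj : j < s.length) → k ≤ j → ¬ s[j] ≤ m) :
    s.filter (fun x => decide (x ≤ m)) = s.take k := by
  induction s generalizing k with
  | nil => simp
  | cons x t ih =>
      cases k with
      | zero =>
          have hx : ¬ x ≤ m := h2 0 (by simp) (by omega)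
          have ht : t.filter (fun x => decide (x ≤ m)) = t.take 0 := by
            apply ih 0 (by omega)
            · intro j hj hj0; omega
            · intro j hj _; exact h2 (j + 1) (by simpa using hj) (by omega)
          simpa [List.filter_cons, hx] using ht
      | succ j =>
          have hx : x ≤ m := h1 0 (by simp) (by omega)
          have ht : t.filter (fun x => decide (x ≤ m)) = t.take j := by
            apply ih j (by simpa using hk)
            · intro i hi hik; exact h1 (i + 1) (by simpa using hi) (by omega)
            · intro i hi hik; exact h2 (i + 1) (by simpa using hi) (by omega)
          simp [hx, ht]

-- the fast error equals A's error, for the sorted copy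
theorem err_eq (nums : List Int) (m : Int)
    (s : List Int) (hs : s = PySem.List.sorted nums (fun x => x))
    (k : Nat) (hk : k = PySem.List.bisectRight s m) :
    m * (k : Int) - (buildPre s).getD k 0 + ((buildPre s).getD s.length 0 - (buildPre s).getD k 0)
       - m * ((s.length : Int) - (k : Int))
      = (nums.map (fun num => |num - m|)).sum := by
  subst hs hk
  set s := PySem.List.sorted nums (fun x => x) with hsdef
  set k := PySem.List.bisectRight s m with hkdef
  have hpw : s.Pairwise (fun a b => a ≤ b) := by
    simpa using PySem.List.sorted_pairwise (xs := nums) (key := fun x => x)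
  have hperm : s.Perm nums := PySem.List.sorted_perm ..
  obtain ⟨hkle, hlt, hge⟩ := PySem.List.bisectRight_spec s m hpw
  have hfilter : s.filter (fun x => decide (x ≤ m)) = s.take k :=
    filter_eq_take s m k hkle (fun j hj hjk => hlt j hj hjk)
      (fun j hj hkj => not_le.mpr (hge j hj hkj))
  have hA : (nums.map (fun num => |num - m|)).sum = (s.map (fun num => |num - m|)).sum :=
    ((hperm.map _).sum_eq).symm
  rw [hA, sum_abs_split s m, hfilter]
  rw [pre_getD s k hkle, pre_getD s s.length le_rfl]
  simp only [List.length_take, List.take_length]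
  rw [← hkdef] at hkle
  rw [Nat.min_eq_left hkle]

-- the two loops agree when the two error computations agree pointwise
theorem loop_eq (nums s pre : List Int) (total : Int) (n : Nat) (target : Int)
    (herr : ∀ m : Int,
      m * ((PySem.List.bisectRight s m : Nat) : Int) - pre.getD (PySem.List.bisectRight s m) 0
        + (total - pre.getD (PySem.List.bisectRight s m) 0)
        - m * ((n : Int) - ((PySem.List.bisectRight s m : Nat) : Int))
      = (nums.map (fun num => |num - m|)).sum) :
    ∀ N left right, (right + 1 - left).toNat ≤ N →
      ladLoopA nums target left right = ladLoopB s pre total n target left right := by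
  intro N
  induction N with
  | zero =>
      intro left right hN
      rw [ladLoopA, ladLoopB]
      have : ¬ left ≤ right := by omega
      simp [this]
  | succ N ih =>
      intro left right hN
      rw [ladLoopA, ladLoopB]
      by_cases hlr : left ≤ right
      · have hmid := PySem.Int.floordiv_two_mid_bounds (lo := left) (hi := right) hlr
        simp only [hlr, dif_pos]
        rw [herr (PySem.Int.floordiv (left + right) 2)]
        split_ifs
        · rfl
        · exact ih left (PySem.Int.floordiv (left + right) 2 - 1) (by omega)
        · exact ih (PySem.Int.floordiv (left + right) 2 + 1) right (by omega)
      · simp [hlr]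

-- head of the sorted list is min(nums), last is max(nums)
theorem sorted_head_min (nums : List Int) (h : nums ≠ []) :
    PySem.List.min? nums (fun x => x)
      = some ((PySem.List.sorted nums (fun x => x)).getD 0 0) := by
  have hperm : (PySem.List.sorted nums (fun x => x)).Perm nums := PySem.List.sorted_perm ..
  have hs : PySem.List.sorted nums (fun x => x) ≠ [] := by
    intro hnil
    have h0 : ([] : List Int).Perm nums := hnil ▸ hperm
    exact h h0.symm.eq_nil
  obtain ⟨hd, tl, hcons⟩ := List.exists_cons_of_ne_nil hs
  have hhd : ∀ y ∈ nums, hd ≤ y := by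
    simpa using PySem.List.key_head_sorted_le (xs := nums) (key := fun x => x) hcons
  obtain ⟨m0, hm0⟩ : ∃ m0, PySem.List.min? nums (fun x => x) = some m0 := by
    cases hmin : PySem.List.min? nums (fun x => x) with
    | none => exact absurd ((PySem.List.min?_eq_none_iff _ _).mp hmin) h
    | some m0 => exact ⟨m0, rfl⟩
  have hmem : m0 ∈ nums := PySem.List.min?_mem hm0
  have hmin : ∀ y ∈ nums, m0 ≤ y := by
    intro y hy; simpa using PySem.List.min?_isMin hm0 y hy
  have hd_mem : hd ∈ nums := hperm.mem_iff.mp (by simp [hcons])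
  have : m0 = hd := le_antisymm (hmin hd hd_mem) (hhd m0 hmem)
  rw [hm0, this, hcons]; simp

theorem sorted_last_max (nums : List Int) (h : nums ≠ []) :
    PySem.List.max? nums (fun x => x)
      = some ((PySem.List.sorted nums (fun x => x)).getD
          ((PySem.List.sorted nums (fun x => x)).length - 1) 0) := by
  have hperm : (PySem.List.sorted nums (fun x => x)).Perm nums := PySem.List.sorted_perm ..
  set s := PySem.List.sorted nums (fun x => x) with hsdef
  have hs : s ≠ [] := by
    intro hnil
    have h0 : ([] : List Int).Perm nums := hnil ▸ hperm
    exact h h0.symm.eq_nil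
  have hlen : 0 < s.length := List.length_pos_iff.mpr hs
  have hlast_mem : s[s.length - 1] ∈ nums := hperm.mem_iff.mp (List.getElem_mem _)
  have hmax_last : ∀ y ∈ s, y ≤ s[s.length - 1] := by
    intro y hy
    obtain ⟨i, hi, rfl⟩ := List.getElem_of_mem hy
    have := PySem.List.sorted_id_getElem_mono (xs := nums)
      (p := i) (q := s.length - 1) (by omega) (by rw [← hsdef]; omega)
    simpa [hsdef] using this
  obtain ⟨M, hM⟩ : ∃ M, PySem.List.max? nums (fun x => x) = some M := by
    cases hmax : PySem.List.max? nums (fun x => x) with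
    | none => exact absurd ((PySem.List.max?_eq_none_iff _ _).mp hmax) h
    | some M => exact ⟨M, rfl⟩
  have hMmem : M ∈ s := hperm.mem_iff.mpr (PySem.List.max?_mem hM)
  have hMmax : ∀ y ∈ nums, y ≤ M := by
    intro y hy; simpa using PySem.List.max?_isMax hM y hy
  have : M = s[s.length - 1] :=
    le_antisymm (hmax_last M hMmem) (hMmax _ hlast_mem)
  rw [hM, this, List.getD_eq_getElem _ _ (by omega)]

-- ===== VERDICT (by name: the statement is the Claim_ definition above) =====
theorem least_absolute_deviations_spec : Claim_equal_least_absolute_deviations := by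
  intro nums target _hdom hpre
  unfold Spec_least_absolute_deviations least_absolute_deviations least_absolute_deviations_alt
  rw [sorted_head_min nums hpre, sorted_last_max nums hpre]
  simp only
  apply loop_eq _ _ _ _ _ _ (fun m => ?_) _ _ _ le_rfl
  exact err_eq nums m _ rfl _ rfl
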